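-- pv_equiv track=rewrite | github.com/cinderlee/advent-of-code | 2020/day17.py | get_updated_active_set
-- ===== SOURCE A (Python) =====
-- def get_updated_active_set(neighbor_counts, curr_active_set):
--     '''
--     Returns a new set of active cubes. The current active set
--     and dictionary where the location key is mapped to number of
--     active neighbors are given.
--     '''
--     new_active_set = set()
--     for elem in neighbor_counts:
--         if elem in curr_active_set and (neighbor_counts[elem] == 2 or neighbor_counts[elem] == 3):
--             new_active_set.add(elem)
--         elif elem not in curr_active_set and neighbor_counts[elem] == 3:
--             new_active_set.add(elem)
--     return new_active_set
-- ===== SOURCE B (Python) =====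
-- def get_updated_active_set(neighbor_counts, curr_active_set):
--     '''
--     Set-algebra version: collect every cell whose neighbor count could keep
--     it active (2 or 3), then subtract the count-2 cells that are not
--     currently active (only a 3 can activate an inactive cell).
--     '''
--     candidates = {e for e, c in neighbor_counts.items() if c in (2, 3)}
--     lonely = {e for e, c in neighbor_counts.items() if c == 2 and e not in curr_active_set}
--     return candidates - lonely
-- ===== Notes on version B (the rewrite author's own statement) =====
-- stated objective: alternative
-- what changed: Replaces the per-element membership branch (if/elif with dict lookups inside the loop) by set algebra: build the set of all cells with neighbor count 2 or 3, build the set of count-2 cells that are not currently active, and return their set difference.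
import Mathlib
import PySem

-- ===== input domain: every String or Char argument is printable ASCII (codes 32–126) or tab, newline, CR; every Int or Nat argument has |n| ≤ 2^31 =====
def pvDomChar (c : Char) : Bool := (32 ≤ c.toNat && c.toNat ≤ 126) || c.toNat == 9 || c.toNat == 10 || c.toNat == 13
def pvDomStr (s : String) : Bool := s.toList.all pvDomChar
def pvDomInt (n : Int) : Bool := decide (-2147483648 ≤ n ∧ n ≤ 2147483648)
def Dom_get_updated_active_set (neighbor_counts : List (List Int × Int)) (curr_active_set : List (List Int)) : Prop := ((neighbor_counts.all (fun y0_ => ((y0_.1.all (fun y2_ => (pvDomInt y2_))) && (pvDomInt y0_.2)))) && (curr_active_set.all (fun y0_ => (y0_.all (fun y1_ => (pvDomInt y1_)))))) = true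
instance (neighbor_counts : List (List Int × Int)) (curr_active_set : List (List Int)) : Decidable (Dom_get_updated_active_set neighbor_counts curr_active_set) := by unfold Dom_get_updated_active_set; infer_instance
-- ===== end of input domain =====

-- B replaces A's per-element if/elif branch by set algebra (candidates with count 2 or 3,
-- minus the count-2 cells that are not currently active); same cost, alternative decomposition.
-- The assoc-list parameter stands for a Python dict: both ports normalise it with Dict.insert
-- (insertion order, later binding overwrites), exactly as dict construction does.

-- ===== PORT A =====
def get_updated_active_set (neighbor_counts : List (List Int × Int)) (curr_active_set : List (List Int)) : List (List Int) :=
  let d := neighbor_counts.foldl (fun d p => d.insert p.1 p.2) PySem.Dict.empty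
  -- new_active_set = set(); for elem in neighbor_counts: …
  d.keys.foldl (fun new_active_set elem =>
    if curr_active_set.contains elem && (d.getD elem 0 == 2 || d.getD elem 0 == 3) then
      PySem.Set.add new_active_set elem
    else if !(curr_active_set.contains elem) && d.getD elem 0 == 3 then
      PySem.Set.add new_active_set elem
    else new_active_set) PySem.Set.empty

-- ===== PORT B =====
def get_updated_active_set_alt (neighbor_counts : List (List Int × Int)) (curr_active_set : List (List Int)) : List (List Int) :=
  let d := neighbor_counts.foldl (fun d p => d.insert p.1 p.2) PySem.Dict.empty
  let candidates := PySem.Set.ofList ((d.items.filter (fun p => p.2 == 2 || p.2 == 3)).map Prod.fst)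
  let lonely := PySem.Set.ofList ((d.items.filter (fun p => p.2 == 2 && !(curr_active_set.contains p.1))).map Prod.fst)
  PySem.Set.diff candidates lonely

-- ===== PRECONDITION & SPEC =====
def Spec_get_updated_active_set (neighbor_counts : List (List Int × Int)) (curr_active_set : List (List Int)) (out : List (List Int)) : Prop := out = get_updated_active_set_alt neighbor_counts curr_active_set
instance (neighbor_counts : List (List Int × Int)) (curr_active_set : List (List Int)) (out : List (List Int)) : Decidable (Spec_get_updated_active_set neighbor_counts curr_active_set out) := by unfold Spec_get_updated_active_set; infer_instance

-- ===== CLAIM (what is proved, stated in full; the proofs are below) =====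
def Claim_equal_get_updated_active_set : Prop := ∀ (neighbor_counts : List (List Int × Int)) (curr_active_set : List (List Int)), Dom_get_updated_active_set neighbor_counts curr_active_set → Spec_get_updated_active_set neighbor_counts curr_active_set (get_updated_active_set neighbor_counts curr_active_set)

-- ===== LEMMAS AND PROOFS =====

-- A's loop over a duplicate-free key list is the filter by "branch 1 or branch 2".
theorem foldA_eq_filter {α : Type} [BEq α] [LawfulBEq α] (c1 c2 : α → Bool) :
    ∀ (xs s : List α), xs.Nodup → (∀ x ∈ xs, x ∉ s) →
      xs.foldl (fun acc e => if c1 e then PySem.Set.add acc e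
                             else if c2 e then PySem.Set.add acc e else acc) s
        = s ++ xs.filter (fun e => c1 e || c2 e) := by
  intro xs
  induction xs with
  | nil => intro s _ _; simp
  | cons x xs ih =>
    intro s hnd hfresh
    have hxns : x ∉ s := hfresh x (by simp)
    have hadd : PySem.Set.add s x = s ++ [x] := by
      simp [PySem.Set.add, PySem.Set.contains, hxns]
    have hnd' : xs.Nodup := (List.nodup_cons.mp hnd).2
    have hxnotin : x ∉ xs := (List.nodup_cons.mp hnd).1
    by_cases h1 : c1 x = true
    · have hfresh' : ∀ y ∈ xs, y ∉ s ++ [x] := by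
        intro y hy
        simp only [List.mem_append, List.mem_singleton]
        rintro (hs | rfl)
        · exact hfresh y (by simp [hy]) hs
        · exact hxnotin hy
      simp only [List.foldl_cons, h1, if_true, hadd]
      rw [ih (s ++ [x]) hnd' hfresh']
      simp [h1]
    · by_cases h2 : c2 x = true
      · have hfresh' : ∀ y ∈ xs, y ∉ s ++ [x] := by
          intro y hy
          simp only [List.mem_append, List.mem_singleton]
          rintro (hs | rfl)
          · exact hfresh y (by simp [hy]) hs
          · exact hxnotin hy
        simp only [List.foldl_cons, h1, h2, if_true, if_false, Bool.false_eq_true, hadd]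
        rw [ih (s ++ [x]) hnd' hfresh']
        simp [h1, h2]
      · simp only [List.foldl_cons, h1, h2, Bool.false_eq_true, if_false]
        rw [ih s hnd' (fun y hy => hfresh y (by simp [hy]))]
        simp [h1, h2]

-- the two programs agree for ANY dict with duplicate-free keys
theorem dict_core (d : PySem.Dict (List Int) Int) (cur : List (List Int))
    (hnd : d.keys.Nodup) :
    d.keys.foldl (fun s e =>
        if cur.contains e && (d.getD e 0 == 2 || d.getD e 0 == 3) then PySem.Set.add s e
        else if !(cur.contains e) && d.getD e 0 == 3 then PySem.Set.add s e
        else s) PySem.Set.empty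
    = PySem.Set.diff
        (PySem.Set.ofList ((d.items.filter (fun p => p.2 == 2 || p.2 == 3)).map Prod.fst))
        (PySem.Set.ofList ((d.items.filter (fun p => p.2 == 2 && !(cur.contains p.1))).map Prod.fst)) := by
  have hitems := PySem.Dict.items_eq_map_keys d hnd 0
  -- rewrite both filtered item lists as key filters
  have hcand : (d.items.filter (fun p => p.2 == 2 || p.2 == 3)).map Prod.fst
      = d.keys.filter (fun k => d.getD k 0 == 2 || d.getD k 0 == 3) := by
    rw [hitems, List.filter_map, List.map_map]
    simp [Function.comp_def]
  have hlon : (d.items.filter (fun p => p.2 == 2 && !(cur.contains p.1))).map Prod.fst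
      = d.keys.filter (fun k => d.getD k 0 == 2 && !(cur.contains k)) := by
    rw [hitems, List.filter_map, List.map_map]
    simp [Function.comp_def]
  rw [hcand, hlon,
      PySem.Set.ofList_eq_self_of_nodup _ (hnd.filter _),
      PySem.Set.ofList_eq_self_of_nodup _ (hnd.filter _)]
  rw [foldA_eq_filter (fun e => cur.contains e && (d.getD e 0 == 2 || d.getD e 0 == 3))
        (fun e => !(cur.contains e) && d.getD e 0 == 3) d.keys PySem.Set.empty hnd
        (by intro x _; simp [PySem.Set.empty])]
  simp only [PySem.Set.empty, List.nil_append, PySem.Set.diff, PySem.Set.contains]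
  rw [List.filter_filter]
  apply List.filter_congr
  intro k hk
  by_cases h2 : d.getD k 0 = 2 <;> by_cases h3 : d.getD k 0 = 3
  · omega
  all_goals by_cases hc : k ∈ cur <;>
    simp [List.mem_filter, hk, h2, h3, hc]

-- ===== VERDICT (by name: the statement is the Claim_ definition above) =====
theorem get_updated_active_set_spec : Claim_equal_get_updated_active_set := by
  intro neighbor_counts curr_active_set _hdom
  unfold Spec_get_updated_active_set get_updated_active_set get_updated_active_set_alt
  exact dict_core _ curr_active_set
    (PySem.Dict.nodup_keys_foldl_insert_key neighbor_counts Prod.fst (fun _ p => p.2)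
      PySem.Dict.empty PySem.Dict.nodup_keys_empty)
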